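-- pv_equiv track=rewrite | github.com/evelynV-exe/Projects | Number System Converter.py | detect_base
-- ===== SOURCE A (Python) =====
-- def detect_base(numStr):
--     #clear the decimal number and uppercase everything
--     num = numStr.replace(".", "").upper()
--
--     #set of number systems
--     bases = {
--         2: set("01"),
--         8: set("01234567"),
--         10: set("0123456789"),
--         16: set("0123456789ABCDEF")
--     }
--
--     #what base user enter in
--     for base in (2, 8, 10, 16):
--         if all(ch in bases[base] for ch in num):
--             return base
--
--     raise ValueError("Invalid number for bases 2, 8, 10, or 16.")
-- ===== SOURCE B (Python) =====
-- def detect_base(numStr):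
--     # one aggregating pass: track the maximum per-character base requirement
--     num = numStr.replace(".", "").upper()
--     base = 2
--     for ch in num:
--         if ch in "01":
--             r = 2
--         elif "2" <= ch <= "7":
--             r = 8
--         elif ch in "89":
--             r = 10
--         elif "A" <= ch <= "F":
--             r = 16
--         else:
--             raise ValueError("Invalid number for bases 2, 8, 10, or 16.")
--         if r > base:
--             base = r
--     return base
-- ===== Notes on version B (the rewrite author's own statement) =====
-- stated objective: simpler
-- what changed: Replaces up to four full membership scans with early return by one pass over the string tracking the maximum per-character minimal base.
import Mathlib
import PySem

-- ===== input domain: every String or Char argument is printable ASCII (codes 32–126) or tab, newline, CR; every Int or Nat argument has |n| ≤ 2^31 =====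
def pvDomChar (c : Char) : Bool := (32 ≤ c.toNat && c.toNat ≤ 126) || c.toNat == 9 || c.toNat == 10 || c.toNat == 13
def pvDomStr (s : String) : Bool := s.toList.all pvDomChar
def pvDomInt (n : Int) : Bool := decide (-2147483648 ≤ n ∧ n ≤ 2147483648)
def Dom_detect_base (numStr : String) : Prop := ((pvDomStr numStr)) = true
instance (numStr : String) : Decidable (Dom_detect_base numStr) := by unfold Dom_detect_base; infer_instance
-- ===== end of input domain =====

-- B replaces A's four early-return membership scans by a single pass tracking the
-- maximum per-character minimal base; Pre_ excludes exactly the inputs where A raises ValueError.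


-- ===== PORT A =====
-- literal port of A: strip dots, uppercase, then scan the four digit sets in order.
-- 0 stands for the ValueError at the end (excluded by Pre_detect_base).
def detect_base (numStr : String) : Int :=
  let num := PySem.Str.upper (PySem.Str.replace numStr "." "")
  let b2 := PySem.Set.ofList "01".toList
  let b8 := PySem.Set.ofList "01234567".toList
  let b10 := PySem.Set.ofList "0123456789".toList
  let b16 := PySem.Set.ofList "0123456789ABCDEF".toList
  if num.toList.all (fun ch => PySem.Set.contains b2 ch) then 2
  else if num.toList.all (fun ch => PySem.Set.contains b8 ch) then 8
  else if num.toList.all (fun ch => PySem.Set.contains b10 ch) then 10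
  else if num.toList.all (fun ch => PySem.Set.contains b16 ch) then 16
  else 0

-- ===== PORT B =====
-- per-character minimal base; none = the ValueError raised inside B's loop
def reqBase (ch : Char) : Option Int :=
  if ch = '0' ∨ ch = '1' then some 2
  else if '2' ≤ ch ∧ ch ≤ '7' then some 8
  else if ch = '8' ∨ ch = '9' then some 10
  else if 'A' ≤ ch ∧ ch ≤ 'F' then some 16
  else none

-- B's loop: running maximum, abort (none) on an invalid character
def detectGo : List Char → Int → Option Int
  | [], base => some base
  | c :: t, base =>
    match reqBase c with
    | none => none
    | some r => detectGo t (if r > base then r else base)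

def detect_base_alt (numStr : String) : Int :=
  let num := PySem.Str.upper (PySem.Str.replace numStr "." "")
  (detectGo num.toList 2).getD 0

-- ===== PRECONDITION & SPEC =====
-- Pre_ excludes exactly the inputs on which A raises ValueError (some character is
-- not a dot, a decimal digit or a hex letter in either case); B raises the same error there.
-- the characters A accepts: dot, decimal digits, hex letters in either case
def allowedChars : List Char :=
  ['.','0','1','2','3','4','5','6','7','8','9','a','b','c','d','e','f','A','B','C','D','E','F']
def Pre_detect_base (numStr : String) : Prop :=
  numStr.toList.all (fun c => allowedChars.contains c) = true
instance (numStr : String) : Decidable (Pre_detect_base numStr) := by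
  unfold Pre_detect_base; infer_instance

def pvWitness_detect_base : String := "1A.f"

def Spec_detect_base (numStr : String) (out : Int) : Prop := out = detect_base_alt numStr
instance (numStr : String) (out : Int) : Decidable (Spec_detect_base numStr out) := by unfold Spec_detect_base; infer_instance

-- ===== CLAIM (what is proved, stated in full; the proofs are below) =====
def Claim_equal_detect_base : Prop := ∀ (numStr : String), Dom_detect_base numStr → Pre_detect_base numStr → Spec_detect_base numStr (detect_base numStr)

-- ===== LEMMAS AND PROOFS =====

-- replace s "." "" removes exactly the dots
theorem replace_go_dot (fuel : Nat) (l acc : List Char) (h : l.length ≤ fuel) :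
    PySem.Chars.replace.go ['.'] [] fuel l acc = acc.reverse ++ l.filter (· ≠ '.') := by
  induction fuel generalizing l acc with
  | zero =>
    have : l = [] := List.eq_nil_of_length_eq_zero (Nat.le_zero.mp h)
    subst this
    simp [PySem.Chars.replace.go]
  | succ n ih =>
    cases l with
    | nil => simp [PySem.Chars.replace.go]
    | cons c t =>
      rw [PySem.Chars.replace.go]
      by_cases hc : c = '.'
      · subst hc
        simp only [List.isPrefixOf, BEq.rfl, Bool.true_and,
          if_pos, List.length_cons, List.drop_succ_cons, List.length_nil, List.drop_zero,
          List.reverse_nil, List.nil_append]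
        rw [ih t acc (by simpa using Nat.le_of_succ_le_succ h)]
        simp
      · have : (List.isPrefixOf ['.'] (c :: t)) = false := by
          simp [List.isPrefixOf]; exact fun h' => absurd h'.symm hc
        rw [this]
        simp only [Bool.false_eq_true, if_false]
        rw [ih t (c :: acc) (by simpa using Nat.le_of_succ_le_succ h)]
        simp [hc]

theorem processed_chars (s : String) :
    (PySem.Str.upper (PySem.Str.replace s "." "")).toList
      = (s.toList.filter (· ≠ '.')).map PySem.Chars.upperChar := by
  simp [PySem.Str.upper, PySem.Str.replace, PySem.Chars.upper, PySem.Chars.replace,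
    String.toList_ofList]
  rw [replace_go_dot _ _ _ (by simp)]
  simp

-- the 16 valid processed characters
def hex16 : List Char := ['0','1','2','3','4','5','6','7','8','9','A','B','C','D','E','F']

theorem mem_hex16_of_pre (s : String) (hp : Pre_detect_base s) :
    ∀ c ∈ (PySem.Str.upper (PySem.Str.replace s "." "")).toList, c ∈ hex16 := by
  rw [processed_chars]
  intro c hc
  obtain ⟨d, hd, rfl⟩ := List.mem_map.mp hc
  have hd' := List.mem_filter.mp hd
  have hmem : d ∈ allowedChars := by
    have := List.all_eq_true.mp hp d hd'.1
    simpa using this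
  have hne : d ≠ '.' := by simpa using hd'.2
  revert hne
  have : ∀ d ∈ allowedChars, d ≠ '.' →
      PySem.Chars.upperChar d ∈ hex16 := by
    intro d hd
    fin_cases hd <;> intro hne <;> first | decide | exact absurd rfl hne
  exact this d hmem

-- per-character semantics of the four set checks, against reqBase (B's requirement)
theorem req_defined : ∀ c ∈ hex16, reqBase c = some ((reqBase c).getD 0) := by intro c hc; fin_cases hc <;> decide

theorem req_vals : ∀ c ∈ hex16, (reqBase c).getD 0 = 2 ∨ (reqBase c).getD 0 = 8 ∨
    (reqBase c).getD 0 = 10 ∨ (reqBase c).getD 0 = 16 := by intro c hc; fin_cases hc <;> decide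

theorem contains2_iff : ∀ c ∈ hex16,
    PySem.Set.contains (PySem.Set.ofList "01".toList) c = decide ((reqBase c).getD 0 ≤ 2) := by intro c hc; fin_cases hc <;> decide
theorem contains8_iff : ∀ c ∈ hex16,
    PySem.Set.contains (PySem.Set.ofList "01234567".toList) c = decide ((reqBase c).getD 0 ≤ 8) := by intro c hc; fin_cases hc <;> decide
theorem contains10_iff : ∀ c ∈ hex16,
    PySem.Set.contains (PySem.Set.ofList "0123456789".toList) c = decide ((reqBase c).getD 0 ≤ 10) := by intro c hc; fin_cases hc <;> decide
theorem contains16_iff : ∀ c ∈ hex16,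
    PySem.Set.contains (PySem.Set.ofList "0123456789ABCDEF".toList) c = true := by intro c hc; fin_cases hc <;> decide

-- B's loop computes the running maximum of the requirements
theorem detectGo_eq_foldl (L : List Char) (b : Int) (h : ∀ c ∈ L, c ∈ hex16) :
    detectGo L b = some (L.foldl (fun m c => max m ((reqBase c).getD 0)) b) := by
  induction L generalizing b with
  | nil => simp [detectGo]
  | cons c t ih =>
    have hc := h c (List.mem_cons_self ..)
    have hmax : (if (reqBase c).getD 0 > b then (reqBase c).getD 0 else b)
        = max b ((reqBase c).getD 0) := by
      split_ifs with h' <;> omega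
    rw [detectGo, req_defined c hc]
    show detectGo t (if (reqBase c).getD 0 > b then (reqBase c).getD 0 else b)
        = some (List.foldl (fun m c => max m ((reqBase c).getD 0)) b (c :: t))
    rw [hmax, ih (max b ((reqBase c).getD 0)) (fun d hd => h d (List.mem_cons_of_mem _ hd))]
    simp

theorem foldl_max_le (L : List Char) (b k : Int) :
    L.foldl (fun m c => max m ((reqBase c).getD 0)) b ≤ k ↔
      b ≤ k ∧ ∀ c ∈ L, (reqBase c).getD 0 ≤ k := by
  induction L generalizing b with
  | nil => simp
  | cons c t ih =>
    simp only [List.foldl_cons, ih, max_le_iff, List.mem_cons]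
    constructor
    · rintro ⟨⟨h1, h2⟩, h3⟩
      exact ⟨h1, fun d hd => hd.elim (fun e => e ▸ h2) (h3 d)⟩
    · rintro ⟨h1, h2⟩
      exact ⟨⟨h1, h2 c (Or.inl rfl)⟩, fun d hd => h2 d (Or.inr hd)⟩

theorem foldl_max_attained (L : List Char) (b : Int) :
    L.foldl (fun m c => max m ((reqBase c).getD 0)) b = b ∨
      ∃ c ∈ L, L.foldl (fun m c => max m ((reqBase c).getD 0)) b = (reqBase c).getD 0 := by
  induction L generalizing b with
  | nil => simp
  | cons c t ih =>
    simp only [List.foldl_cons]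
    rcases ih (max b ((reqBase c).getD 0)) with h | ⟨d, hd, h⟩
    · rcases max_cases b ((reqBase c).getD 0) with ⟨he, _⟩ | ⟨he, _⟩
      · exact Or.inl (h.trans he)
      · exact Or.inr ⟨c, List.mem_cons_self .., h.trans he⟩
    · exact Or.inr ⟨d, List.mem_cons_of_mem _ hd, h⟩

-- ===== VERDICT (by name: the statement is the Claim_ definition above) =====
theorem detect_base_spec : Claim_equal_detect_base := by
  intro s _ hp
  rw [Pre_detect_base] at hp
  simp only [Spec_detect_base, detect_base, detect_base_alt]
  have hv := mem_hex16_of_pre s hp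
  set L := (PySem.Str.upper (PySem.Str.replace s "." "")).toList with hL
  rw [detectGo_eq_foldl L 2 hv]
  set M := L.foldl (fun m c => max m ((reqBase c).getD 0)) 2 with hM
  have h2le : (2 : Int) ≤ M := ((foldl_max_le L 2 M).mp (hM ▸ le_rfl)).1
  have hvals : M = 2 ∨ M = 8 ∨ M = 10 ∨ M = 16 := by
    rcases foldl_max_attained L 2 with h | ⟨c, hc, h⟩
    · exact Or.inl (hM.trans h)
    · rcases req_vals c (hv c hc) with h' | h' | h' | h' <;> rw [hM, h, h'] <;> simp
  have key : ∀ (k : Int) (st : PySem.Set Char), 2 ≤ k →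
      (∀ c ∈ hex16, PySem.Set.contains st c = decide ((reqBase c).getD 0 ≤ k)) →
      ((L.all (fun ch => PySem.Set.contains st ch) = true) ↔ M ≤ k) := by
    intro k st hk hst
    rw [List.all_eq_true, hM, foldl_max_le]
    constructor
    · intro h
      refine ⟨hk, fun c hc => ?_⟩
      have := h c hc
      rw [hst c (hv c hc)] at this
      exact of_decide_eq_true this
    · intro h c hc
      rw [hst c (hv c hc)]
      exact decide_eq_true (h.2 c hc)
  have k2 := key 2 _ le_rfl contains2_iff
  have k8 := key 8 _ (by norm_num) contains8_iff
  have k10 := key 10 _ (by norm_num) contains10_iff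
  have hall16 : L.all
      (fun ch => PySem.Set.contains (PySem.Set.ofList "0123456789ABCDEF".toList) ch) = true :=
    List.all_eq_true.mpr fun c hc => contains16_iff c (hv c hc)
  simp only [Option.getD_some]
  split_ifs with h1 h2 h3
  · have := k2.mp h1; omega
  · have hle := k8.mp h2
    have hgt : ¬ M ≤ 2 := fun h => h1 (k2.mpr h)
    rcases hvals with h' | h' | h' | h' <;> omega
  · have hle := k10.mp h3
    have hgt : ¬ M ≤ 8 := fun h => h2 (k8.mpr h)
    rcases hvals with h' | h' | h' | h' <;> omega
  · have hgt : ¬ M ≤ 10 := fun h => h3 (k10.mpr h)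
    rcases hvals with h' | h' | h' | h' <;> omega
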